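-- pv_equiv track=rewrite | github.com/motokikando/code_algorithm | atcoder/Medium/c_bugged.py | get_max_score
-- ===== SOURCE A (Python) =====
-- def get_max_score(s) -> int:
--     ans = sum(s)
--     s = sorted(s)
--     for v in s:
--         if ans % 10 != 0:
--             return ans
--         if v % 10 != 0:
--             ans -= v
--
--     return 0
-- ===== SOURCE B (Python) =====
-- def get_max_score(s) -> int:
--     total = sum(s)
--     if total % 10 != 0:
--         return total
--     m = None
--     for v in s:
--         if v % 10 != 0 and (m is None or v < m):
--             m = v
--     return total - m if m is not None else 0
-- ===== Notes on version B (the rewrite author's own statement) =====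
-- stated objective: faster
-- what changed: B replaces A's sort-then-scan (sorted copy walked with a running remainder) by a single unsorted pass that checks sum % 10 and tracks the minimum element not divisible by 10.
import Mathlib
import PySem

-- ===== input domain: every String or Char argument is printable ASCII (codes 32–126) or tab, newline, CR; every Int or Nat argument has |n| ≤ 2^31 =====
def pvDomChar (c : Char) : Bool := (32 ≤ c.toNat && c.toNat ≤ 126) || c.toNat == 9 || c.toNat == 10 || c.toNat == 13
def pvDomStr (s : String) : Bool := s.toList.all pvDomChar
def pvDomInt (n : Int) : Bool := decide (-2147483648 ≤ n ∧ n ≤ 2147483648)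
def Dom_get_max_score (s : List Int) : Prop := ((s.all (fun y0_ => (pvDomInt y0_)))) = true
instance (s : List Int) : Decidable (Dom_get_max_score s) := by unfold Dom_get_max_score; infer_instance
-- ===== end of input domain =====

-- B is a single unsorted pass (sum check + running minimum of non-multiples of 10) instead of A's sort-then-scan; return values proved equal.

-- ===== PORT A =====
-- the for-loop of A: walks the sorted list, early-returning ans once it is not ≡ 0 (mod 10)
def gmsLoopA : List Int → Int → Int
  | [], _ => 0
  | v :: rest, ans =>
    if PySem.Int.mod ans 10 ≠ 0 then ans
    else if PySem.Int.mod v 10 ≠ 0 then gmsLoopA rest (ans - v)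
    else gmsLoopA rest ans

def get_max_score (s : List Int) : Int :=
  gmsLoopA (PySem.List.sorted s (fun x => x) false) s.sum

-- ===== PORT B =====
-- the single pass of B: running minimum (as Option) of the elements not divisible by 10
def gmsLoopB : List Int → Option Int → Option Int
  | [], m => m
  | v :: rest, m =>
    gmsLoopB rest
      (if PySem.Int.mod v 10 ≠ 0 ∧ (m = none ∨ ∃ mv, m = some mv ∧ v < mv) then some v else m)

def get_max_score_alt (s : List Int) : Int :=
  let total := s.sum
  if PySem.Int.mod total 10 ≠ 0 then total
  else
    match gmsLoopB s none with
    | some m => total - m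
    | none => 0

-- ===== PRECONDITION & SPEC =====
def Spec_get_max_score (s : List Int) (out : Int) : Prop := out = get_max_score_alt s
instance (s : List Int) (out : Int) : Decidable (Spec_get_max_score s out) := by unfold Spec_get_max_score; infer_instance

-- ===== CLAIM (what is proved, stated in full; the proofs are below) =====
def Claim_equal_get_max_score : Prop := ∀ (s : List Int), Dom_get_max_score s → Spec_get_max_score s (get_max_score s)

-- ===== LEMMAS AND PROOFS =====

-- the predicate "not a multiple of 10"
def gmsNM (v : Int) : Bool := decide (PySem.Int.mod v 10 ≠ 0)

lemma gmsNM_iff (v : Int) : gmsNM v = true ↔ v % 10 ≠ 0 := by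
  simp [gmsNM, PySem.Int.mod_eq_emod_of_pos (a := v) (by norm_num : (0:Int) < 10)]

lemma gmsNM_mod (v : Int) (hv : ¬ gmsNM v = true) : v % 10 = 0 := by
  by_contra hc; exact hv ((gmsNM_iff v).mpr hc)

-- A's loop returns ans immediately on a nonempty list whose entry remainder is nonzero
lemma gmsLoopA_ret (t : List Int) (ans : Int) (ht : t ≠ []) (h : ans % 10 ≠ 0) :
    gmsLoopA t ans = ans := by
  cases t with
  | nil => exact absurd rfl ht
  | cons v rest =>
    simp [gmsLoopA, PySem.Int.mod_eq_emod_of_pos (a := ans) (by norm_num : (0:Int) < 10), h]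

-- if nothing in t is a non-multiple of 10, A's loop returns 0 (from a 0-remainder ans)
lemma gmsLoopA_none (t : List Int) (ans : Int) (h0 : ans % 10 = 0)
    (hf : t.filter gmsNM = []) : gmsLoopA t ans = 0 := by
  induction t generalizing ans with
  | nil => simp [gmsLoopA]
  | cons v rest ih =>
    have hv : ¬ (gmsNM v = true) := by
      intro hv
      simp [List.filter_cons, hv] at hf
    have hf' : rest.filter gmsNM = [] := by
      rw [List.filter_cons, if_neg (by simpa using hv)] at hf
      exact hf
    simp only [gmsLoopA, PySem.Int.mod_eq_emod_of_pos (by norm_num : (0:Int) < 10)]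
    rw [if_neg (by simp [h0]), if_neg (by simp [gmsNM_mod v hv])]
    exact ih ans h0 hf'

-- with >= 2 non-multiples present, A's loop returns ans minus the FIRST non-multiple
lemma gmsLoopA_two (t : List Int) (ans m m2 : Int) (tail : List Int)
    (h0 : ans % 10 = 0) (hf : t.filter gmsNM = m :: m2 :: tail) :
    gmsLoopA t ans = ans - m := by
  induction t generalizing ans with
  | nil => simp at hf
  | cons v rest ih =>
    simp only [gmsLoopA, PySem.Int.mod_eq_emod_of_pos (by norm_num : (0:Int) < 10)]
    rw [if_neg (by simp [h0])]
    by_cases hv : gmsNM v = true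
    · have hvm : v % 10 ≠ 0 := (gmsNM_iff v).mp hv
      rw [if_pos (by simpa using hvm)]
      rw [List.filter_cons, if_pos (by simpa using hv)] at hf
      obtain ⟨hvm', hrest⟩ : v = m ∧ rest.filter gmsNM = m2 :: tail := by
        simpa using hf
      subst hvm'
      have hne : rest ≠ [] := by
        intro h; rw [h] at hrest; simp at hrest
      exact gmsLoopA_ret rest (ans - v) hne (by omega)
    · rw [if_neg (by simp [gmsNM_mod v hv])]
      rw [List.filter_cons, if_neg (by simpa using hv)] at hf
      exact ih ans h0 hf

-- B's loop is a fold of the running-min step over the filtered list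
lemma gmsLoopB_filter (t : List Int) (acc : Option Int) :
    gmsLoopB t acc =
      (t.filter gmsNM).foldl
        (fun m v => if m = none ∨ ∃ mv, m = some mv ∧ v < mv then some v else m) acc := by
  induction t generalizing acc with
  | nil => simp [gmsLoopB]
  | cons v rest ih =>
    simp only [gmsLoopB, List.filter_cons]
    by_cases hv : gmsNM v = true
    · have hmod : PySem.Int.mod v 10 ≠ 0 := by simpa [gmsNM] using hv
      rw [ih, if_pos hv, List.foldl_cons]
      congr 1
      by_cases hp : acc = none ∨ ∃ mv, acc = some mv ∧ v < mv
      · rw [if_pos ⟨hmod, hp⟩, if_pos hp]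
      · rw [if_neg (fun hc => hp hc.2), if_neg hp]
    · have hmod : ¬ PySem.Int.mod v 10 ≠ 0 := by simpa [gmsNM] using hv
      rw [if_neg (fun hc => hmod hc.1), if_neg hv]
      exact ih acc

-- the running-min fold from `some c` lands on the least element m reachable from c
lemma gmsFold_reach (l : List Int) (c m : Int) (hm : m ≤ c) (hmem : m = c ∨ m ∈ l)
    (hlb : ∀ x ∈ l, m ≤ x) :
    l.foldl (fun a v => if a = none ∨ ∃ mv, a = some mv ∧ v < mv then some v else a)
      (some c) = some m := by
  induction l generalizing c with
  | nil =>
    rcases hmem with h | h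
    · simp [h]
    · simp at h
  | cons z zs ih =>
    have hz : m ≤ z := hlb z (List.mem_cons_self ..)
    have hlb' : ∀ x ∈ zs, m ≤ x := fun x hx => hlb x (List.mem_cons_of_mem _ hx)
    simp only [List.foldl_cons]
    by_cases hzc : z < c
    · rw [if_pos (Or.inr ⟨c, rfl, hzc⟩)]
      refine ih z hz ?_ hlb'
      rcases hmem with h | h
      · omega
      · rcases List.mem_cons.mp h with h1 | h2
        · exact Or.inl h1
        · exact Or.inr h2
    · rw [if_neg (by push_neg; exact ⟨by simp, fun mv hmv => by simp at hmv; omega⟩)]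
      refine ih c hm ?_ hlb'
      rcases hmem with h | h
      · exact Or.inl h
      · rcases List.mem_cons.mp h with h1 | h2
        · left; omega
        · exact Or.inr h2

-- the sum of a list is congruent mod 10 to the sum of its non-multiples-of-10
lemma gmsSum_mod (l : List Int) : l.sum % 10 = (l.filter gmsNM).sum % 10 := by
  induction l with
  | nil => rfl
  | cons v rest ih =>
    by_cases hv : gmsNM v = true
    · rw [List.filter_cons, if_pos (by simpa using hv)]
      simp only [List.sum_cons]; omega
    · rw [List.filter_cons, if_neg (by simpa using hv)]
      have := gmsNM_mod v hv
      simp only [List.sum_cons]; omega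

-- ===== VERDICT (by name: the statement is the Claim_ definition above) =====
theorem get_max_score_spec : Claim_equal_get_max_score := by
  intro s _
  unfold Spec_get_max_score get_max_score get_max_score_alt
  set t := PySem.List.sorted s (fun x => x) false with ht
  have hperm : t.Perm s := PySem.List.sorted_perm ..
  have hsum : t.sum = s.sum := hperm.sum_eq
  have hsort : t.Pairwise (· ≤ ·) := by
    simpa using PySem.List.sorted_pairwise (xs := s) (key := fun x => x)
  have hpermf : (t.filter gmsNM).Perm (s.filter gmsNM) := hperm.filter _
  simp only [PySem.Int.mod_eq_emod_of_pos (by norm_num : (0:Int) < 10)]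
  by_cases h : s.sum % 10 = 0
  · rw [if_neg (by simp [h])]
    rcases hft : t.filter gmsNM with _ | ⟨m, rest⟩
    · -- no non-multiple of 10 anywhere: both sides are 0
      have hfs : s.filter gmsNM = [] := by
        rw [hft] at hpermf; exact hpermf.symm.eq_nil
      rw [gmsLoopA_none t s.sum h hft, gmsLoopB_filter s none, hfs]
      rfl
    · rcases hr : rest with _ | ⟨m2, tail⟩
      · -- exactly ONE non-multiple would contradict sum % 10 = 0
        exfalso
        have hm : m % 10 ≠ 0 := by
          have hmem : m ∈ t.filter gmsNM := by rw [hft]; simp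
          exact (gmsNM_iff m).mp (List.mem_filter.mp hmem).2
        have hfm : t.filter gmsNM = [m] := by rw [hft, hr]
        rw [hfm] at hpermf
        have hps := hpermf.symm.sum_eq
        simp at hps
        have := gmsSum_mod s
        omega
      · subst hr
        rw [gmsLoopA_two t s.sum m m2 tail h hft]
        -- B's running minimum is m: m is a lower bound of the filtered list
        have hmlb : ∀ x ∈ t.filter gmsNM, m ≤ x := by
          have hp : (t.filter gmsNM).Pairwise (· ≤ ·) :=
            hsort.sublist List.filter_sublist
          rw [hft] at hp
          intro x hx
          rw [hft] at hx
          rcases List.mem_cons.mp hx with h1 | h2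
          · omega
          · exact (List.pairwise_cons.mp hp).1 x h2
        have hmlbs : ∀ x ∈ s.filter gmsNM, m ≤ x := fun x hx =>
          hmlb x (hpermf.mem_iff.mpr hx)
        rw [gmsLoopB_filter s none]
        rcases hfs : s.filter gmsNM with _ | ⟨y, ys⟩
        · rw [hfs] at hpermf; simp [hpermf.eq_nil] at hft
        · have hym : m ≤ y := hmlbs y (by rw [hfs]; simp)
          have hmy : m ∈ y :: ys := by
            rw [← hfs]
            exact hpermf.mem_iff.mp (by rw [hft]; simp)
          have hmin : (y :: ys).foldl
              (fun a v => if a = none ∨ ∃ mv, a = some mv ∧ v < mv then some v else a)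
              none = some m := by
            rw [List.foldl_cons,
               if_pos (show (none : Option Int) = none ∨
                 ∃ mv, (none : Option Int) = some mv ∧ y < mv from Or.inl rfl)]
            exact gmsFold_reach ys y m hym
              (by rcases List.mem_cons.mp hmy with h1 | h2
                  exacts [Or.inl h1, Or.inr h2])
              (fun x hx => hmlbs x (by rw [hfs]; simp [hx]))
          rw [hmin]
  · -- sum % 10 ≠ 0: A returns at the first loop check; B returns total directly
    rw [if_pos h]
    have htne : t ≠ [] := by
      intro he
      have hse : s = [] := (he ▸ hperm).symm.eq_nil
      rw [hse] at h; simp at h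
    exact gmsLoopA_ret t s.sum htne h
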